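-- pv_equiv track=rewrite | github.com/MrMostach-creator/VigiFroid | vigi/services/reports.py | _parse_emails_fallback
-- ===== SOURCE A (Python) =====
-- from typing import Iterable, List, Optional
--
-- def _parse_emails_fallback(raw: str) -> List[str]:
--     """
--     Parse emails separated by newline/comma/semicolon.
--     Fallback if vigi.utils.parse_emails is not available.
--     """
--     if not raw:
--         return []
--     parts = []
--     for chunk in raw.replace(";", ",").split(","):
--         parts.extend(chunk.splitlines())
--     cleaned = []
--     for e in [p.strip() for p in parts]:
--         if e and "@" in e:
--             cleaned.append(e)
--     # de-dup while keeping order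
--     out = []
--     seen = set()
--     for e in cleaned:
--         if e.lower() not in seen:
--             seen.add(e.lower())
--             out.append(e)
--     return out
-- ===== SOURCE B (Python) =====
-- def _parse_emails_fallback(raw: str):
--     if not raw:
--         return []
--     out = []
--     seen = set()
--     cur = []
--     for ch in raw + "\n":
--         if ch in ",;\n\r":
--             tok = "".join(cur).strip()
--             cur = []
--             if tok and "@" in tok:
--                 low = tok.lower()
--                 if low not in seen:
--                     seen.add(low)
--                     out.append(tok)
--         else:
--             cur.append(ch)
--     return out
-- ===== Notes on version B (the rewrite author's own statement) =====
-- stated objective: alternative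
-- what changed: A's three staged passes (split on commas/semicolons then splitlines each chunk, then a strip-and-filter pass, then a dedup pass) are fused into a single character-level scan that cuts a token at each comma, semicolon or newline and strips, filters and dedups it as it is flushed.
import Mathlib
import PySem

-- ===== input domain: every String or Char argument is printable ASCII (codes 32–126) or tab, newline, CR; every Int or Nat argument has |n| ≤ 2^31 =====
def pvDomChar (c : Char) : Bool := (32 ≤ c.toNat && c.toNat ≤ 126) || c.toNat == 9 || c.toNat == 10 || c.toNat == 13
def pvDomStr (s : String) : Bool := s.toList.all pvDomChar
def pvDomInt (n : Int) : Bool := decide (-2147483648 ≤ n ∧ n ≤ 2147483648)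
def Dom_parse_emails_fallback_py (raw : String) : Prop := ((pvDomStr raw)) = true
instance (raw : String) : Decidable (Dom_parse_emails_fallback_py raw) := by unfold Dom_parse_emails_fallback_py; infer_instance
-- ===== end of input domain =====

-- B replaces A's three staged passes (split/splitlines, then strip-filter, then dedup)
-- by a single character-level scan that flushes, filters and dedups each token in one loop.

-- shared loop bodies, named so the proofs can speak about them
def pvGood (e : List Char) : Bool := (!e.isEmpty) && PySem.Chars.isIn ['@'] e

def pvDedup (st : List (List Char) × PySem.Set (List Char)) (e : List Char) :
    List (List Char) × PySem.Set (List Char) :=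
  if PySem.Set.contains st.2 (PySem.Chars.lower e) then st
  else (st.1 ++ [e], PySem.Set.add st.2 (PySem.Chars.lower e))

-- ===== PORT A =====
def parse_emails_fallback_py (raw : String) : List String :=
  let cs := raw.toList
  if cs.isEmpty then [] else
  let parts : List (List Char) :=
    (PySem.Chars.splitOn (PySem.Chars.replace cs [';'] [',']) [',']).foldl
      (fun acc chunk => acc ++ PySem.Chars.splitlines chunk) []
  let cleaned : List (List Char) :=
    (parts.map (fun p => PySem.Chars.strip p)).foldl
      (fun acc e => if pvGood e then acc ++ [e] else acc) []
  ((cleaned.foldl pvDedup ([], PySem.Set.empty)).1).map String.ofList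

-- ===== PORT B =====
def pvSep (c : Char) : Bool := c == ',' || c == ';' || c == '\n' || c == '\r'

-- the flush of B's scan: strip the pending token, keep it if good and unseen
def pvTok (st : List (List Char) × PySem.Set (List Char)) (t : List Char) :
    List (List Char) × PySem.Set (List Char) :=
  let e := PySem.Chars.strip t
  if pvGood e then pvDedup st e else st

def pvStepB (st : List (List Char) × PySem.Set (List Char) × List Char) (ch : Char) :
    List (List Char) × PySem.Set (List Char) × List Char :=
  if pvSep ch then
    let r := pvTok (st.1, st.2.1) st.2.2
    (r.1, r.2, [])
  else (st.1, st.2.1, st.2.2 ++ [ch])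

def parse_emails_fallback_py_alt (raw : String) : List String :=
  let cs := raw.toList
  if cs.isEmpty then [] else
  ((((cs ++ ['\n']).foldl pvStepB ([], PySem.Set.empty, [])).1)).map String.ofList

-- ===== PRECONDITION & SPEC =====
def Spec_parse_emails_fallback_py (raw : String) (out : List String) : Prop := out = parse_emails_fallback_py_alt raw
instance (raw : String) (out : List String) : Decidable (Spec_parse_emails_fallback_py raw out) := by unfold Spec_parse_emails_fallback_py; infer_instance

-- ===== CLAIM (what is proved, stated in full; the proofs are below) =====
def Claim_equal_parse_emails_fallback_py : Prop := ∀ (raw : String), Dom_parse_emails_fallback_py raw → Spec_parse_emails_fallback_py raw (parse_emails_fallback_py raw)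

-- ===== LEMMAS AND PROOFS =====

def pvSplit (p : Char → Bool) : List Char → List (List Char)
  | [] => [[]]
  | c :: rest => if p c then [] :: pvSplit p rest else (pvSplit p rest).modifyHead (c :: ·)

def pvSub (c : Char) : Char := if c = ';' then ',' else c
def pvComma (c : Char) : Bool := c == ',' || c == ';'
def pvNl (c : Char) : Bool := c == '\n' || c == '\r'

lemma pvSplit_ne_nil (p : Char → Bool) (l : List Char) : pvSplit p l ≠ [] := by
  cases l with
  | nil => simp [pvSplit]
  | cons c rest =>
    simp only [pvSplit]
    split
    · simp
    · cases h : pvSplit p rest with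
      | nil => exact absurd h (pvSplit_ne_nil p rest)
      | cons a t => simp

lemma modifyHead_id (l : List (List Char)) :
    l.modifyHead (fun t => t) = l := by
  cases l <;> simp

lemma pvSplit_mem (p : Char → Bool) (l : List Char) :
    ∀ t ∈ pvSplit p l, ∀ c ∈ t, c ∈ l ∧ p c = false := by
  induction l with
  | nil => simp [pvSplit]
  | cons a rest ih =>
    intro t ht c hc
    simp only [pvSplit] at ht
    by_cases hp : p a
    · simp only [hp, if_true, List.mem_cons] at ht
      rcases ht with rfl | ht
      · simp at hc
      · have := ih t ht c hc
        exact ⟨List.mem_cons_of_mem _ this.1, this.2⟩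
    · simp only [hp, if_false] at ht
      cases hs : pvSplit p rest with
      | nil => exact absurd hs (pvSplit_ne_nil p rest)
      | cons h0 hs' =>
        rw [hs] at ht
        simp only [List.modifyHead_cons, List.mem_cons] at ht
        rcases List.mem_cons.1 ht with h1 | ht
        · rw [h1] at hc
          rcases List.mem_cons.1 hc with hca | hc'
          · exact ⟨by rw [hca]; exact List.mem_cons_self, by rw [hca]; simpa using hp⟩
          · have := ih h0 (by rw [hs]; exact List.mem_cons_self) c hc'
            exact ⟨List.mem_cons_of_mem _ this.1, this.2⟩
        · have := ih t (by rw [hs]; exact List.mem_cons_of_mem _ ht) c hc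
          exact ⟨List.mem_cons_of_mem _ this.1, this.2⟩

lemma pvSplit_or (p q : Char → Bool) (l : List Char) :
    pvSplit (fun c => p c || q c) l = (pvSplit p l).flatMap (pvSplit q) := by
  induction l with
  | nil => simp [pvSplit]
  | cons c rest ih =>
    cases hs : pvSplit p rest with
    | nil => exact absurd hs (pvSplit_ne_nil p rest)
    | cons h0 hs' =>
      cases ht : pvSplit q h0 with
      | nil => exact absurd ht (pvSplit_ne_nil q h0)
      | cons x xs =>
        by_cases hp : p c
        · simp [pvSplit, hp, ih]
        · by_cases hq : q c
          · simp [pvSplit, hp, hq, hs, ih, ht]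
          · simp [pvSplit, hp, hq, hs, ih, ht]

lemma replace_go (fuel : Nat) : ∀ (l acc : List Char), l.length ≤ fuel →
    PySem.Chars.replace.go [';'] [','] fuel l acc = acc.reverse ++ l.map pvSub := by
  induction fuel with
  | zero => intro l acc h; simp at h; simp [h, PySem.Chars.replace.go]
  | succ n ih =>
    intro l acc h
    cases l with
    | nil => simp [PySem.Chars.replace.go]
    | cons c t =>
      rw [PySem.Chars.replace.go]
      by_cases hc : c = ';'
      · subst hc
        simp [List.isPrefixOf, ih t _ (by simpa using h), pvSub]
      · have hp : List.isPrefixOf [';'] (c :: t) = false := by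
          simp [List.isPrefixOf, Ne.symm hc]
        simp [hp, ih t _ (by simpa using h), pvSub, hc]

lemma pvReplace (cs : List Char) : PySem.Chars.replace cs [';'] [','] = cs.map pvSub := by
  simp [PySem.Chars.replace, replace_go cs.length cs [] le_rfl]

lemma splitOn_go (fuel : Nat) : ∀ (l cur : List Char) (accs : List (List Char)),
    l.length < fuel →
    PySem.Chars.splitOn.go [','] fuel l cur accs = accs.reverse ++
      (pvSplit (· == ',') l).modifyHead (cur.reverse ++ ·) := by
  induction fuel with
  | zero => intro l cur accs h; omega
  | succ n ih =>
    intro l cur accs h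
    cases l with
    | nil =>
      rw [PySem.Chars.splitOn.go]
      · simp [pvSplit]
      · omega
    | cons c t =>
      rw [PySem.Chars.splitOn.go]
      by_cases hc : c = ','
      · subst hc
        have hpre : List.isPrefixOf [','] (',' :: t) = true := by simp [List.isPrefixOf]
        simp only [hpre, if_true, List.length_cons, List.length_nil, List.drop_succ_cons,
          List.drop_zero]
        rw [ih t [] _ (by simpa using h)]
        simp [pvSplit, modifyHead_id]
      · have hpre : List.isPrefixOf [','] (c :: t) = false := by
          simp [List.isPrefixOf, Ne.symm hc]
        simp only [hpre, Bool.false_eq_true, if_false]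
        rw [ih t (c :: cur) _ (by simpa using h)]
        simp only [pvSplit, beq_iff_eq, hc, if_false, List.modifyHead_modifyHead,
          Function.comp_def]
        congr 2
        funext x
        simp

lemma pvSplitOn (cs : List Char) :
    PySem.Chars.splitOn cs [','] = pvSplit (· == ',') cs := by
  rw [PySem.Chars.splitOn, splitOn_go (cs.length + 1) cs [] [] (by omega)]
  simpa using modifyHead_id (pvSplit (· == ',') cs)

lemma pvSplit_map_sub (l : List Char) :
    pvSplit (· == ',') (l.map pvSub) = pvSplit pvComma l := by
  induction l with
  | nil => simp [pvSplit]
  | cons c rest ih =>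
    by_cases hc : pvComma c
    · have hsub : pvSub c = ',' := by
        rcases (by simpa [pvComma] using hc : c = ',' ∨ c = ';') with rfl | rfl <;> simp [pvSub]
      simp [pvSplit, hsub, hc, ih]
    · have h1 : pvSub c = c := by
        simp only [pvComma, Bool.or_eq_true, beq_iff_eq, not_or] at hc
        simp [pvSub, hc.2]
      have h2 : (c == ',') = false := by
        simp only [pvComma, Bool.or_eq_true, not_or] at hc
        simpa using hc.1
      simp [pvSplit, h1, h2, hc, ih]

lemma splitlines_go (isB : Char → Bool)
    (hB : ∀ c, pvDomChar c = true → isB c = pvNl c) :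
    ∀ (n : Nat) (l cur : List Char) (acc : List (List Char)), l.length ≤ n →
    (∀ c ∈ l, pvDomChar c = true) →
    (PySem.Chars.splitlines.go isB l cur acc).filter (· ≠ []) =
      acc.reverse.filter (· ≠ []) ++
        ((pvSplit pvNl l).modifyHead (cur.reverse ++ ·)).filter (· ≠ []) := by
  intro n
  induction n with
  | zero =>
    intro l cur acc hl hd
    have : l = [] := by cases l <;> simp_all
    subst this
    rw [PySem.Chars.splitlines.go]
    by_cases hc : cur = []
    · simp [hc, pvSplit]
    · simp [hc, pvSplit, List.filter_append]
  | succ n ih =>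
    intro l cur acc hl hd
    cases l with
    | nil =>
      rw [PySem.Chars.splitlines.go]
      by_cases hc : cur = []
      · simp [hc, pvSplit]
      · simp [hc, pvSplit, List.filter_append]
    | cons c rest =>
      by_cases hCR : c = '\r' ∧ rest.head? = some '\n'
      · obtain ⟨rfl, hh⟩ := hCR
        cases rest with
        | nil => simp at hh
        | cons c2 r2 =>
          have : c2 = '\n' := by simpa using hh
          subst this
          rw [PySem.Chars.splitlines.go]
          rw [ih r2 [] _ (by simp at hl ⊢; omega) (fun c hc => hd c (by simp [hc]))]
          have hr : pvNl '\r' = true := by decide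
          have hn : pvNl '\n' = true := by decide
          by_cases hc : cur = [] <;>
            simp [pvSplit, hr, hn, List.filter_append, modifyHead_id, hc]
      · rw [PySem.Chars.splitlines.go]
        · by_cases hb : isB c
          · rw [if_pos hb]
            rw [ih rest [] _ (by simp at hl ⊢; omega) (fun x hx => hd x (by simp [hx]))]
            have hnl : pvNl c = true := by
              rw [← hB c (hd c (by simp))]; exact hb
            by_cases hc : cur = [] <;>
              simp [hb, pvSplit, hnl, List.filter_append, modifyHead_id, hc]
          · rw [if_neg hb]
            rw [ih rest (c :: cur) _ (by simp at hl ⊢; omega) (fun x hx => hd x (by simp [hx]))]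
            have hnl : pvNl c = false := by
              rw [← hB c (hd c (by simp))]; simpa using hb
            simp only [pvSplit, hnl, Bool.false_eq_true, if_false, List.modifyHead_modifyHead,
              Function.comp_def]
            congr 3
            funext x
            simp
        · intro r2 h1 h2
          exact hCR ⟨h1, by rw [h2]; rfl⟩

lemma pvChar_eq_iff_toNat (c d : Char) : c = d ↔ c.toNat = d.toNat := by
  constructor
  · rintro rfl; rfl
  · intro h
    have h1 := Char.ofNat_toNat c
    have h2 := Char.ofNat_toNat d
    rw [h] at h1
    exact h1.symm.trans h2

lemma pvSplitlines (cs : List Char) (h : ∀ c ∈ cs, pvDomChar c = true) :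
    (PySem.Chars.splitlines cs).filter (· ≠ []) = (pvSplit pvNl cs).filter (· ≠ []) := by
  rw [PySem.Chars.splitlines]
  rw [splitlines_go _ ?hB cs.length cs [] [] le_rfl h]
  · simp [modifyHead_id]
  case hB =>
    intro c hc
    simp only [pvDomChar, Bool.or_eq_true, Bool.and_eq_true, decide_eq_true_eq, beq_iff_eq] at hc
    have e1 : (c == '\n') = decide (c.toNat = 10) := by
      by_cases hh : c.toNat = 10
      · have : c = '\n' := (pvChar_eq_iff_toNat c '\n').mpr (by rw [hh]; rfl)
        simp [this, hh]
      · have : c ≠ '\n' := fun e => hh (by rw [e]; rfl)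
        simp [this, hh]
    have e2 : (c == '\r') = decide (c.toNat = 13) := by
      by_cases hh : c.toNat = 13
      · have : c = '\r' := (pvChar_eq_iff_toNat c '\r').mpr (by rw [hh]; rfl)
        simp [this, hh]
      · have : c ≠ '\r' := fun e => hh (by rw [e]; rfl)
        simp [this, hh]
    simp only [pvNl, e1, e2]
    by_cases h10 : c.toNat = 10 <;> by_cases h13 : c.toNat = 13 <;>
      simp [h10, h13] <;> omega

lemma pvTok_nil (st : List (List Char) × PySem.Set (List Char)) : pvTok st [] = st := by
  simp [pvTok, PySem.Chars.strip, PySem.Chars.lstrip, PySem.Chars.rstrip, pvGood]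

lemma foldl_pvTok_filter (l : List (List Char)) (st : List (List Char) × PySem.Set (List Char)) :
    (l.filter (· ≠ [])).foldl pvTok st = l.foldl pvTok st := by
  induction l generalizing st with
  | nil => rfl
  | cons t rest ih =>
    by_cases h : t = []
    · subst h
      simpa [pvTok_nil] using ih st
    · rw [List.filter_cons, if_pos (by simpa using h), List.foldl_cons]
      exact ih (pvTok st t)

lemma pvFlatMap_congr {α : Type} (f g : List Char → List α) (l : List (List Char))
    (h : ∀ x ∈ l, f x = g x) : l.flatMap f = l.flatMap g := by
  induction l with
  | nil => rfl
  | cons a t ih =>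
    simp only [List.flatMap_cons, h a (by simp), ih fun x hx => h x (by simp [hx])]

lemma scanB (l : List Char) : ∀ (out : List (List Char)) (seen : PySem.Set (List Char)) (cur : List Char),
    (l ++ ['\n']).foldl pvStepB (out, seen, cur) =
      ((((pvSplit pvSep l).modifyHead (cur ++ ·)).foldl pvTok (out, seen)).1,
       (((pvSplit pvSep l).modifyHead (cur ++ ·)).foldl pvTok (out, seen)).2, ([] : List Char)) := by
  induction l with
  | nil =>
    intro out seen cur
    have hs : pvSep '\n' = true := by decide
    simp [pvStepB, hs, pvSplit]
  | cons c rest ih =>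
    intro out seen cur
    by_cases hc : pvSep c
    · have : pvStepB (out, seen, cur) c =
          ((pvTok (out, seen) cur).1, (pvTok (out, seen) cur).2, []) := by
        simp [pvStepB, hc]
      simp only [List.cons_append, List.foldl_cons, this, ih]
      simp [pvSplit, hc, modifyHead_id]
    · have : pvStepB (out, seen, cur) c = (out, seen, cur ++ [c]) := by
        simp [pvStepB, hc]
      simp only [List.cons_append, List.foldl_cons, this, ih]
      have hfun : (fun x => cur ++ c :: x) = (fun x => (cur ++ [c]) ++ x) := by
        funext x; simp
      simp only [pvSplit, hc, Bool.false_eq_true, if_false, List.modifyHead_modifyHead,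
        Function.comp_def, hfun]

lemma stagedA (cs : List Char) (h : ∀ c ∈ cs, pvDomChar c = true) :
    ((((PySem.Chars.splitOn (PySem.Chars.replace cs [';'] [',']) [',']).foldl
        (fun acc chunk => acc ++ PySem.Chars.splitlines chunk) []).map
          (fun p => PySem.Chars.strip p)).foldl
      (fun acc e => if pvGood e then acc ++ [e] else acc) []).foldl pvDedup
        (([], PySem.Set.empty) : List (List Char) × PySem.Set (List Char)) =
      (pvSplit pvSep cs).foldl pvTok ([], PySem.Set.empty) := by
  have hchunks : PySem.Chars.splitOn (PySem.Chars.replace cs [';'] [',']) [','] =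
      pvSplit pvComma cs := by
    rw [pvReplace, pvSplitOn, pvSplit_map_sub]
  rw [hchunks, PySem.List.foldl_append_eq_flatMap, List.nil_append,
    PySem.List.foldl_append_if_eq_filter, List.nil_append,
    ← PySem.List.foldl_if_eq_foldl_filter pvGood pvDedup, List.foldl_map]
  show (List.flatMap PySem.Chars.splitlines (pvSplit pvComma cs)).foldl pvTok
      ([], PySem.Set.empty) = _
  rw [← foldl_pvTok_filter, List.filter_flatMap,
    pvFlatMap_congr _ (fun ch => (pvSplit pvNl ch).filter (· ≠ []))
      _ (fun t ht => pvSplitlines t (fun c hc => h c ((pvSplit_mem pvComma cs t ht c hc).1))),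
    ← List.filter_flatMap, ← pvSplit_or pvComma pvNl cs]
  have hsep : (fun c => pvComma c || pvNl c) = pvSep := by
    funext c; simp [pvComma, pvNl, pvSep, Bool.or_assoc]
  rw [hsep, foldl_pvTok_filter]

-- ===== VERDICT (by name: the statement is the Claim_ definition above) =====
theorem parse_emails_fallback_py_spec : Claim_equal_parse_emails_fallback_py := by
  intro raw hdom
  unfold Spec_parse_emails_fallback_py parse_emails_fallback_py parse_emails_fallback_py_alt
  have h : ∀ c ∈ raw.toList, pvDomChar c = true := by
    have := hdom
    unfold Dom_parse_emails_fallback_py pvDomStr at this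
    simpa [List.all_eq_true] using this
  by_cases hn : raw.toList.isEmpty
  · simp [hn]
  · simp only [hn, Bool.false_eq_true, if_false]
    rw [scanB raw.toList [] PySem.Set.empty []]
    rw [stagedA raw.toList h]
    have hmh : (pvSplit pvSep raw.toList).modifyHead (fun x => [] ++ x) =
        pvSplit pvSep raw.toList := by
      simpa using modifyHead_id (pvSplit pvSep raw.toList)
    simp only [hmh]
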